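-- pv_equiv track=rewrite | github.com/Caerii/assemblies | src/assembly_calculus/emergent/_parser_core.py | _identify_phrases
-- ===== SOURCE A (Python) =====
-- from typing import Dict, List, Optional, Set, Tuple
--
-- def _identify_phrases(words: List[str],
--                       categories: Dict[str, str]) -> dict:
--     """Identify NP, VP, PP phrase boundaries from category sequence."""
--     phrases: dict = {"NP": [], "VP": [], "PP": []}
--     current_np: List[str] = []
--
--     for word in words:
--         cat = categories.get(word, "UNKNOWN")
--         if cat in ("DET", "ADJ", "NOUN", "PRON"):
--             current_np.append(word)
--         else:
--             if current_np:
--                 phrases["NP"].append(current_np[:])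
--                 current_np = []
--             if cat == "VERB":
--                 phrases["VP"].append([word])
--             elif cat == "PREP":
--                 phrases["PP"].append([word])
--
--     if current_np:
--         phrases["NP"].append(current_np)
--
--     return phrases
-- ===== SOURCE B (Python) =====
-- from itertools import groupby
-- from typing import Dict, List
--
-- _NP_CATS = {"DET", "ADJ", "NOUN", "PRON"}
--
-- def _identify_phrases(words: List[str],
--                       categories: Dict[str, str]) -> dict:
--     """Identify NP, VP, PP phrase boundaries by grouping maximal NP runs."""
--     phrases: dict = {"NP": [], "VP": [], "PP": []}
--     in_np = lambda w: categories.get(w, "UNKNOWN") in _NP_CATS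
--     for key, group in groupby(words, key=in_np):
--         if key:
--             phrases["NP"].append(list(group))
--         else:
--             for w in group:
--                 cat = categories.get(w, "UNKNOWN")
--                 if cat == "VERB":
--                     phrases["VP"].append([w])
--                 elif cat == "PREP":
--                     phrases["PP"].append([w])
--     return phrases
-- ===== Notes on version B (the rewrite author's own statement) =====
-- stated objective: alternative
-- what changed: Replaces the manual current_np accumulator with its flush logic by an itertools.groupby pass that partitions the words into maximal runs of NP-category vs non-NP words, appending each NP run wholesale and classifying non-NP words per word.
import Mathlib
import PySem

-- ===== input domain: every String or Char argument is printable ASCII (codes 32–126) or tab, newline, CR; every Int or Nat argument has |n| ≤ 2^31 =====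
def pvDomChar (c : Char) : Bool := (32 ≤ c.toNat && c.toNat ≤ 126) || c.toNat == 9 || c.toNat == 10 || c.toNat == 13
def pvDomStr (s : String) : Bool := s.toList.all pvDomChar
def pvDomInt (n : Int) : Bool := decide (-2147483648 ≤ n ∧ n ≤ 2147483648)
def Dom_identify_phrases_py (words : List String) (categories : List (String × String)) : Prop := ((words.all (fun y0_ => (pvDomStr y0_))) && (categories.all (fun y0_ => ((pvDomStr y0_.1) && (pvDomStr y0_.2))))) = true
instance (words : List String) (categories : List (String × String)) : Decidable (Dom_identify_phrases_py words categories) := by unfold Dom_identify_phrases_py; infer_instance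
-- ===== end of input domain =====

-- B groups the words into maximal runs of NP-category words via a groupby pass instead of A's
-- running current_np accumulator with flush logic; alternative decomposition, same asymptotic cost.

-- ===== PORT A =====
-- state: (current_np, NP, VP, PP)
def pvAState := List String × List (List String) × List (List String) × List (List String)

def pvAStep (d : PySem.Dict String String) (s : pvAState) (word : String) : pvAState :=
  let (np, NPs, VPs, PPs) := s
  let cat := d.getD word "UNKNOWN"
  if cat = "DET" ∨ cat = "ADJ" ∨ cat = "NOUN" ∨ cat = "PRON" then
    (np ++ [word], NPs, VPs, PPs)
  else
    let (NPs, np) := if np ≠ [] then (NPs ++ [np], ([] : List String)) else (NPs, np)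
    if cat = "VERB" then (np, NPs, VPs ++ [[word]], PPs)
    else if cat = "PREP" then (np, NPs, VPs, PPs ++ [[word]])
    else (np, NPs, VPs, PPs)

def identify_phrases_py (words : List String) (categories : List (String × String)) : List (String × List (List String)) :=
  let d := PySem.Dict.ofList categories
  let st := words.foldl (pvAStep d) ([], [], [], [])
  let (np, NPs, VPs, PPs) := st
  let NPs := if np ≠ [] then NPs ++ [np] else NPs
  [("NP", NPs), ("VP", VPs), ("PP", PPs)]

-- ===== PORT B =====
def pvInNP (d : PySem.Dict String String) (w : String) : Bool :=
  let c := d.getD w "UNKNOWN"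
  c = "DET" ∨ c = "ADJ" ∨ c = "NOUN" ∨ c = "PRON"

-- itertools.groupby: split into maximal runs of equal key
def pvGroupRuns (f : String → Bool) : List String → List (Bool × List String)
  | [] => []
  | w :: ws =>
      (f w, w :: ws.takeWhile (fun x => f x == f w)) ::
        pvGroupRuns f (ws.dropWhile (fun x => f x == f w))
termination_by l => l.length
decreasing_by
  exact Nat.lt_succ_of_le (List.length_dropWhile_le _ _)

def pvBInner (d : PySem.Dict String String)
    (s : List (List String) × List (List String)) (w : String) :
    List (List String) × List (List String) :=
  let cat := d.getD w "UNKNOWN"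
  if cat = "VERB" then (s.1 ++ [[w]], s.2)
  else if cat = "PREP" then (s.1, s.2 ++ [[w]])
  else s

def pvBStep (d : PySem.Dict String String)
    (s : List (List String) × List (List String) × List (List String))
    (g : Bool × List String) :
    List (List String) × List (List String) × List (List String) :=
  if g.1 then (s.1 ++ [g.2], s.2.1, s.2.2)
  else
    let (v, p) := g.2.foldl (pvBInner d) (s.2.1, s.2.2)
    (s.1, v, p)

def identify_phrases_py_alt (words : List String) (categories : List (String × String)) : List (String × List (List String)) :=
  let d := PySem.Dict.ofList categories
  let st := (pvGroupRuns (pvInNP d) words).foldl (pvBStep d) ([], [], [])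
  [("NP", st.1), ("VP", st.2.1), ("PP", st.2.2)]

-- ===== PRECONDITION & SPEC =====
def Spec_identify_phrases_py (words : List String) (categories : List (String × String)) (out : List (String × List (List String))) : Prop := out = identify_phrases_py_alt words categories
instance (words : List String) (categories : List (String × String)) (out : List (String × List (List String))) : Decidable (Spec_identify_phrases_py words categories out) := by unfold Spec_identify_phrases_py; infer_instance

-- ===== CLAIM (what is proved, stated in full; the proofs are below) =====
def Claim_equal_identify_phrases_py : Prop := ∀ (words : List String) (categories : List (String × String)), Dom_identify_phrases_py words categories → Spec_identify_phrases_py words categories (identify_phrases_py words categories)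

-- ===== LEMMAS AND PROOFS =====

@[simp] theorem pvGroupRuns_nil (f : String → Bool) : pvGroupRuns f [] = [] := by
  unfold pvGroupRuns
  rfl

theorem pvGroupRuns_cons (f : String → Bool) (w : String) (ws : List String) :
    pvGroupRuns f (w :: ws) =
      (f w, w :: ws.takeWhile (fun x => f x == f w)) ::
        pvGroupRuns f (ws.dropWhile (fun x => f x == f w)) := by
  rw [pvGroupRuns.eq_def]

-- A's step on an NP-category word just extends current_np
theorem pvAStep_np (d : PySem.Dict String String) (s : pvAState) (w : String)
    (h : pvInNP d w = true) : pvAStep d s w = (s.1 ++ [w], s.2.1, s.2.2.1, s.2.2.2) := by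
  obtain ⟨np, NPs, VPs, PPs⟩ := s
  simp only [pvInNP, decide_eq_true_eq] at h
  simp [pvAStep, h]

-- A's fold over a run of NP-category words accumulates the run in current_np
theorem pvAFold_npRun (d : PySem.Dict String String) (run : List String)
    (h : ∀ x ∈ run, pvInNP d x = true) :
    ∀ s : pvAState, run.foldl (pvAStep d) s = (s.1 ++ run, s.2.1, s.2.2.1, s.2.2.2) := by
  induction run with
  | nil => intro s; simp
  | cons w ws ih =>
      intro s
      simp only [List.foldl_cons]
      rw [pvAStep_np d s w (h w (by simp))]
      rw [ih (fun x hx => h x (by simp [hx]))]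
      simp

-- A's step on a non-NP word with empty current_np mirrors B's inner step
theorem pvAStep_nonNP (d : PySem.Dict String String)
    (NPs VPs PPs : List (List String)) (w : String) (h : pvInNP d w = false) :
    pvAStep d ([], NPs, VPs, PPs) w =
      ([], NPs, (pvBInner d (VPs, PPs) w).1, (pvBInner d (VPs, PPs) w).2) := by
  simp only [pvInNP] at h
  simp only [pvAStep, pvBInner]
  split_ifs <;> simp_all

-- A's fold over a run of non-NP words (starting with empty current_np) is B's inner fold
theorem pvAFold_nonNPRun (d : PySem.Dict String String) (run : List String)
    (h : ∀ x ∈ run, pvInNP d x = false) :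
    ∀ NPs VPs PPs : List (List String),
      run.foldl (pvAStep d) ([], NPs, VPs, PPs) =
        ([], NPs, (run.foldl (pvBInner d) (VPs, PPs)).1, (run.foldl (pvBInner d) (VPs, PPs)).2) := by
  induction run with
  | nil => intro NPs VPs PPs; simp
  | cons w ws ih =>
      intro NPs VPs PPs
      simp only [List.foldl_cons]
      rw [pvAStep_nonNP d NPs VPs PPs w (h w (by simp))]
      rw [ih (fun x hx => h x (by simp [hx]))]

-- flushing a nonempty current_np before a non-NP word equals having flushed it already
theorem pvAStep_flush (d : PySem.Dict String String) (np : List String)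
    (NPs VPs PPs : List (List String)) (w : String)
    (hnp : np ≠ []) (h : pvInNP d w = false) :
    pvAStep d (np, NPs, VPs, PPs) w = pvAStep d ([], NPs ++ [np], VPs, PPs) w := by
  simp only [pvInNP] at h
  simp only [pvAStep]
  split_ifs <;> simp_all

-- main invariant: finishing A's loop from current_np = [] equals B's group fold
theorem pvMain (d : PySem.Dict String String) :
    ∀ n (words : List String), words.length ≤ n →
    ∀ NPs VPs PPs : List (List String),
      (let st := words.foldl (pvAStep d) ([], NPs, VPs, PPs)
       ((if st.1 ≠ [] then st.2.1 ++ [st.1] else st.2.1), st.2.2.1, st.2.2.2)) =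
      (pvGroupRuns (pvInNP d) words).foldl (pvBStep d) (NPs, VPs, PPs) := by
  intro n
  induction n with
  | zero =>
      intro words hlen NPs VPs PPs
      have : words = [] := List.eq_nil_of_length_eq_zero (Nat.le_zero.mp hlen)
      subst this
      simp
  | succ n ih =>
      intro words hlen NPs VPs PPs
      match words with
      | [] => simp
      | w :: ws =>
        have hlen' : ws.length ≤ n := Nat.le_of_succ_le_succ hlen
        rw [pvGroupRuns_cons]
        set k := pvInNP d w with hk
        set run := ws.takeWhile (fun x => pvInNP d x == k) with hrun
        set rest := ws.dropWhile (fun x => pvInNP d x == k) with hrest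
        have hsplit : run ++ rest = ws := List.takeWhile_append_dropWhile
        have hrunmem : ∀ x ∈ run, pvInNP d x = k := by
          intro x hx
          have := List.mem_takeWhile_imp hx
          simpa using this
        have hrestlen : rest.length ≤ n := by
          calc rest.length ≤ ws.length := List.length_dropWhile_le _ _
            _ ≤ n := hlen'
        have hresthead : ∀ y ∈ rest.head?, pvInNP d y ≠ k := by
          intro y hy
          have := List.head?_dropWhile_not (fun x => pvInNP d x == k) ws
          rw [hy] at this
          simpa using this
        cases hkval : k with
        | true =>
            -- NP run: A accumulates w :: run, then flushes at head of rest (or at the end)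
            simp only [List.foldl_cons]
            rw [pvAStep_np d _ w (by rw [← hk]; exact hkval)]
            simp only
            rw [← hsplit, List.foldl_append]
            rw [pvAFold_npRun d run (fun x hx => (hrunmem x hx).trans hkval)]
            simp only [List.nil_append, List.cons_append]
            match hre : rest with
            | [] =>
                simp [pvBStep]
            | r :: rs =>
                have hr : pvInNP d r = false := by
                  have := hresthead r rfl
                  rw [hkval] at this
                  simpa using this
                simp only [List.foldl_cons]
                rw [pvAStep_flush d (w :: run) NPs VPs PPs r (by simp) hr]
                have := ih (r :: rs) hrestlen (NPs ++ [w :: run]) VPs PPs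
                simp only [List.foldl_cons] at this
                rw [this]
                simp [pvBStep]
        | false =>
            -- non-NP run: A processes w :: run word by word with empty current_np
            simp only [List.foldl_cons]
            rw [← hsplit, List.foldl_append]
            have hw : pvInNP d w = false := by rw [← hk]; exact hkval
            rw [pvAStep_nonNP d NPs VPs PPs w hw]
            rw [pvAFold_nonNPRun d run (fun x hx => (hrunmem x hx).trans hkval)]
            rw [ih rest hrestlen NPs _ _]
            simp [pvBStep, List.foldl_cons]

-- ===== VERDICT (by name: the statement is the Claim_ definition above) =====
theorem identify_phrases_py_spec : Claim_equal_identify_phrases_py := by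
  intro words categories _
  unfold Spec_identify_phrases_py identify_phrases_py identify_phrases_py_alt
  have := pvMain (PySem.Dict.ofList categories) words.length words (le_refl _) [] [] []
  simp only at this ⊢
  rw [← this]
  rcases words.foldl (pvAStep (PySem.Dict.ofList categories)) ([], [], [], []) with ⟨np, NPs, VPs, PPs⟩
  by_cases h : np = [] <;> simp [h]
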